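-- pv_equiv track=rewrite | github.com/wmwmjun/neetpg-counselling-v2 | backend/ingestion/normalizers.py | split_course_degree_specialty
-- ===== SOURCE A (Python) =====
-- from typing import Optional, Tuple
--
-- _KNOWN_DEGREES = ['MCH', 'DNB', 'DM', 'MPH', 'MD', 'MS', 'MBBS', 'MSC', 'BSC', 'DIPLOMA']
--
-- def split_course_degree_specialty(course_norm: str) -> Tuple[Optional[str], Optional[str]]:
--     if not course_norm:
--         return None, None
--     for deg in _KNOWN_DEGREES:
--         if course_norm.startswith(deg + ' '):
--             return deg, course_norm[len(deg):].strip()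
--         if course_norm == deg:
--             return deg, None
--     return None, course_norm
-- ===== SOURCE B (Python) =====
-- from typing import Optional, Tuple
--
-- _KNOWN_DEGREES = ['MCH', 'DNB', 'DM', 'MPH', 'MD', 'MS', 'MBBS', 'MSC', 'BSC', 'DIPLOMA']
-- _DEGREE_SET = frozenset(_KNOWN_DEGREES)
--
-- def split_course_degree_specialty(course_norm: str) -> Tuple[Optional[str], Optional[str]]:
--     if not course_norm:
--         return None, None
--     parts = course_norm.split(' ', 1)
--     if len(parts) == 1:
--         tok = parts[0]
--         if tok in _DEGREE_SET:
--             return tok, None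
--         return None, course_norm
--     tok, rest = parts
--     if tok in _DEGREE_SET:
--         return tok, rest.strip()
--     return None, course_norm
-- ===== Notes on version B (the rewrite author's own statement) =====
-- stated objective: simpler
-- what changed: Replaced the linear scan over the 10 known degrees (prefix test + equality test per degree) by tokenizing the string once at the first space and a single frozenset membership test on the first token.
import Mathlib
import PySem

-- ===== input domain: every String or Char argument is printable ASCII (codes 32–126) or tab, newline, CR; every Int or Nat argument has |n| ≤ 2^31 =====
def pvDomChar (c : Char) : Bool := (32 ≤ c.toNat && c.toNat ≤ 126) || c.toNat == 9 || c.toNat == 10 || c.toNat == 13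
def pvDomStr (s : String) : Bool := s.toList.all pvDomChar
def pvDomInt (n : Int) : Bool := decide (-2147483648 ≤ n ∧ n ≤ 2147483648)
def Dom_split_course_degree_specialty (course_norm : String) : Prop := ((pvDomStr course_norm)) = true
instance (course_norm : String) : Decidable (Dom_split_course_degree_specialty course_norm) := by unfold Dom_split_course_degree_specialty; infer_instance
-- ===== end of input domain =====

-- B replaces A's scan over the 10 known degrees by splitting off the first token once and one set lookup (simpler).

-- ===== PORT A =====
def pvKnownDegrees : List String := ["MCH", "DNB", "DM", "MPH", "MD", "MS", "MBBS", "MSC", "BSC", "DIPLOMA"]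

-- the 'for deg in _KNOWN_DEGREES' loop with its two early returns
def pvDegLoop (course : String) : List String → Option String × Option String
  | [] => (none, some course)
  | deg :: rest =>
    if PySem.Str.startswith course (deg ++ " ") then
      (some deg, some (PySem.Str.strip (PySem.Str.slice course (some (PySem.Str.len deg)) none)))
    else if course = deg then
      (some deg, none)
    else pvDegLoop course rest

def split_course_degree_specialty (course_norm : String) : Option String × Option String :=
  if course_norm = "" then (none, none)
  else pvDegLoop course_norm pvKnownDegrees

-- ===== PORT B =====
def pvDegreeSet : PySem.Set String := PySem.Set.ofList pvKnownDegrees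

def split_course_degree_specialty_alt (course_norm : String) : Option String × Option String :=
  if course_norm = "" then (none, none)
  else
    match PySem.Str.splitMax? course_norm " " 1 with
    | some [tok] =>
      if tok ∈ pvDegreeSet then (some tok, none) else (none, some course_norm)
    | some [tok, rest] =>
      if tok ∈ pvDegreeSet then (some tok, some (PySem.Str.strip rest)) else (none, some course_norm)
    | _ => (none, some course_norm)  -- unreachable: the separator is nonempty, so the split yields 1 or 2 parts

-- ===== PRECONDITION & SPEC =====
def Spec_split_course_degree_specialty (course_norm : String) (out : Option String × Option String) : Prop := out = split_course_degree_specialty_alt course_norm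
instance (course_norm : String) (out : Option String × Option String) : Decidable (Spec_split_course_degree_specialty course_norm out) := by unfold Spec_split_course_degree_specialty; infer_instance

-- ===== CLAIM (what is proved, stated in full; the proofs are below) =====
def Claim_equal_split_course_degree_specialty : Prop := ∀ (course_norm : String), Dom_split_course_degree_specialty course_norm → Spec_split_course_degree_specialty course_norm (split_course_degree_specialty course_norm)

-- ===== LEMMAS AND PROOFS =====

-- maxsplit budget exhausted: everything left becomes the final piece
theorem pvGoZero (sep : List Char) (fuel : Nat) (l cur : List Char) (acc : List (List Char)) :
    PySem.Chars.splitOnMax.go sep fuel 0 l cur acc = ((cur.reverse ++ l) :: acc).reverse := by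
  cases fuel with
  | zero => rfl
  | succ f =>
    cases l with
    | nil => simp [PySem.Chars.splitOnMax.go]
    | cons c rest => simp [PySem.Chars.splitOnMax.go]

-- no separator ahead: the whole remainder becomes the final piece
theorem pvGoNoSep (fuel : Nat) (l : List Char) (h : ' ' ∉ l) (cur : List Char) (acc : List (List Char)) :
    PySem.Chars.splitOnMax.go [' '] fuel 1 l cur acc = ((cur.reverse ++ l) :: acc).reverse := by
  induction fuel generalizing l cur with
  | zero => rfl
  | succ f ih =>
    cases l with
    | nil => simp [PySem.Chars.splitOnMax.go]
    | cons c rest =>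
      have hc : (' ' == c) = false := by
        simp only [beq_eq_false_iff_ne, ne_eq]
        intro e; exact h (by simp [← e])
      rw [PySem.Chars.splitOnMax.go]
      simp only [List.isPrefixOf, hc, Bool.false_and, if_neg (by decide : ¬ (1:Nat) = 0)]
      rw [ih rest (fun hm => h (List.mem_cons_of_mem _ hm)) (c :: cur)]
      simp

-- first separator found with budget 1: split there, the rest is the final piece
theorem pvGoSep (suf : List Char) : ∀ (pre : List Char), ' ' ∉ pre →
    ∀ (fuel : Nat) (cur : List Char) (acc : List (List Char)), pre.length < fuel →
    PySem.Chars.splitOnMax.go [' '] fuel 1 (pre ++ ' ' :: suf) cur acc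
      = (suf :: (cur.reverse ++ pre) :: acc).reverse := by
  intro pre
  induction pre with
  | nil =>
    intro _ fuel cur acc hf
    cases fuel with
    | zero => omega
    | succ f =>
      rw [List.nil_append, PySem.Chars.splitOnMax.go]
      simp only [List.isPrefixOf, beq_self_eq_true, Bool.true_and,
        if_neg (by decide : ¬ (1:Nat) = 0), if_true]
      rw [show (1:Nat) - 1 = 0 from rfl, pvGoZero]
      simp
  | cons c pre' ih =>
    intro hpre fuel cur acc hf
    cases fuel with
    | zero => simp at hf
    | succ f =>
      have hc : (' ' == c) = false := by
        simp only [beq_eq_false_iff_ne, ne_eq]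
        intro e; exact hpre (by simp [← e])
      rw [List.cons_append, PySem.Chars.splitOnMax.go]
      simp only [List.isPrefixOf, hc, Bool.false_and, if_neg (by decide : ¬ (1:Nat) = 0)]
      rw [ih (fun hm => hpre (List.mem_cons_of_mem _ hm)) f (c :: cur) acc (by simp at hf; omega)]
      simp

theorem pvSplitNoSpace (cs : List Char) (h : ' ' ∉ cs) :
    PySem.Chars.splitOnMax cs [' '] 1 = [cs] := by
  rw [PySem.Chars.splitOnMax, if_neg (by decide)]
  rw [show ((1:Int)).toNat = 1 from rfl, pvGoNoSep _ _ h]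
  simp

theorem pvSplitSpace (pre suf : List Char) (h : ' ' ∉ pre) :
    PySem.Chars.splitOnMax (pre ++ ' ' :: suf) [' '] 1 = [pre, suf] := by
  rw [PySem.Chars.splitOnMax, if_neg (by decide)]
  rw [show ((1:Int)).toNat = 1 from rfl, pvGoSep suf pre h _ _ _ (by simp only [List.length_append, List.length_cons]; omega)]
  simp

-- two space-free words followed by the same first space: the words coincide
theorem pvPrefixEq (c : Char) : ∀ (as bs t : List Char), c ∉ as → c ∉ bs →
    (as ++ [c]) <+: (bs ++ c :: t) → as = bs := by
  intro as
  induction as with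
  | nil =>
    intro bs t _ hbs hp
    cases bs with
    | nil => rfl
    | cons b bs' =>
      obtain ⟨u, hu⟩ := hp
      simp at hu
      exact absurd (by simp [hu.1]) hbs
  | cons a as' ih =>
    intro bs t has hbs hp
    cases bs with
    | nil =>
      obtain ⟨u, hu⟩ := hp
      simp at hu
      exact absurd (by simp [hu.1]) has
    | cons b bs' =>
      obtain ⟨u, hu⟩ := hp
      simp at hu
      obtain ⟨hab, hrest⟩ := hu
      have : as' = bs' := ih bs' t (fun hm => has (List.mem_cons_of_mem _ hm))
        (fun hm => hbs (List.mem_cons_of_mem _ hm)) ⟨u, by simpa using hrest⟩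
      simp [hab, this]

-- a string containing a space splits at its first space
theorem pvSplitAtSpace (cs : List Char) (h : ' ' ∈ cs) :
    ∃ pre suf, cs = pre ++ ' ' :: suf ∧ ' ' ∉ pre := by
  induction cs with
  | nil => cases h
  | cons c rest ih =>
    by_cases hc : c = ' '
    · exact ⟨[], rest, by simp [hc], by simp⟩
    · have : ' ' ∈ rest := by
        cases h with
        | head => exact absurd rfl hc
        | tail _ hm => exact hm
      obtain ⟨pre, suf, heq, hpre⟩ := ih this
      exact ⟨c :: pre, suf, by simp [heq], by
        simp only [List.mem_cons, not_or]
        exact ⟨fun e => hc e.symm, hpre⟩⟩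

theorem pvStripSpaceCons (l : List Char) :
    PySem.Chars.strip (' ' :: l) = PySem.Chars.strip l := by
  simp [PySem.Chars.strip, PySem.Chars.lstrip, List.dropWhile, show PySem.Chars.isspace ' ' = true from rfl]

theorem pvDegreesNoSpace : ∀ d ∈ pvKnownDegrees, ' ' ∉ d.toList := by decide

-- A's loop on a space-free course: only the equality test can fire
theorem pvLoopNoSpace (course : String) (h : ' ' ∉ course.toList) :
    ∀ degs : List String, (∀ d ∈ degs, ' ' ∉ d.toList) →
    pvDegLoop course degs = if course ∈ degs then (some course, none) else (none, some course) := by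
  intro degs
  induction degs with
  | nil => intro _; simp [pvDegLoop]
  | cons deg rest ih =>
    intro hd
    rw [pvDegLoop]
    have hsw : PySem.Str.startswith course (deg ++ " ") = false := by
      rw [PySem.Str.startswith_eq]
      simp only [PySem.Chars.startswith]
      rw [Bool.eq_false_iff]
      intro hb
      rw [List.isPrefixOf_iff_prefix] at hb
      exact h (hb.subset (by simp [String.toList_append]))
    rw [hsw, if_neg (by simp)]
    by_cases he : course = deg
    · simp [he]
    · rw [if_neg he, ih (fun d hm => hd d (List.mem_cons_of_mem _ hm))]
      simp [List.mem_cons, he]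

-- A's loop on a course whose first word is pre: only the prefix test can fire, exactly at pre
theorem pvLoopSpace (course : String) (pre suf : List Char)
    (hcs : course.toList = pre ++ ' ' :: suf) (hpre : ' ' ∉ pre) :
    ∀ degs : List String, (∀ d ∈ degs, ' ' ∉ d.toList) →
    pvDegLoop course degs =
      if String.ofList pre ∈ degs
      then (some (String.ofList pre), some (String.ofList (PySem.Chars.strip suf)))
      else (none, some course) := by
  intro degs
  induction degs with
  | nil => intro _; simp [pvDegLoop]
  | cons deg rest ih =>
    intro hd
    rw [pvDegLoop]
    have hne : course ≠ deg := by
      intro e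
      have : ' ' ∈ deg.toList := by rw [← e, hcs]; simp
      exact hd deg (List.mem_cons_self ..) this
    by_cases hsw : PySem.Str.startswith course (deg ++ " ") = true
    · have hpref : (deg.toList ++ [' ']) <+: (pre ++ ' ' :: suf) := by
        rw [PySem.Str.startswith_eq] at hsw
        simp only [PySem.Chars.startswith] at hsw
        rw [List.isPrefixOf_iff_prefix] at hsw
        simpa [String.toList_append, hcs] using hsw
      have hdp : deg.toList = pre := pvPrefixEq ' ' deg.toList pre suf
        (hd deg (List.mem_cons_self ..)) hpre hpref
      have hds : String.ofList pre = deg := by rw [← hdp, String.ofList_toList]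
      rw [hsw, if_pos rfl, if_pos (by simp [hds])]
      refine Prod.ext (by simp [hds]) ?_
      simp only [Option.some.injEq]
      apply String.toList_inj.mp
      rw [PySem.Str.toList_strip, String.toList_ofList, PySem.Str.toList_slice]
      rw [PySem.Str.len_eq]
      simp only [PySem.Chars.slice_eq_listSlice]
      rw [PySem.List.slice_from _ (by positivity)]
      rw [hcs, Int.toNat_natCast, hdp, List.drop_left, pvStripSpaceCons]
    · rw [Bool.not_eq_true] at hsw
      rw [hsw, if_neg (by simp), if_neg hne, ih (fun d hm => hd d (List.mem_cons_of_mem _ hm))]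
      have hnd : String.ofList pre ≠ deg := by
        intro e
        have ht : PySem.Str.startswith course (deg ++ " ") = true := by
          rw [PySem.Str.startswith_eq]
          simp only [PySem.Chars.startswith]
          rw [List.isPrefixOf_iff_prefix]
          rw [String.toList_append, hcs, ← e, String.toList_ofList]
          exact ⟨suf, by simp⟩
        rw [ht] at hsw
        cases hsw
      simp [List.mem_cons, hnd]

-- ===== VERDICT (by name: the statement is the Claim_ definition above) =====
theorem split_course_degree_specialty_spec : Claim_equal_split_course_degree_specialty := by
  intro course _
  unfold Spec_split_course_degree_specialty
  unfold split_course_degree_specialty split_course_degree_specialty_alt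
  by_cases hemp : course = ""
  · simp [hemp]
  · rw [if_neg hemp, if_neg hemp]
    have hsplit : PySem.Str.splitMax? course " " 1
        = Option.map (List.map String.ofList) (PySem.Chars.splitMax? course.toList [' '] 1) := rfl
    by_cases hsp : ' ' ∈ course.toList
    · obtain ⟨pre, suf, heq, hpre⟩ := pvSplitAtSpace course.toList hsp
      rw [pvLoopSpace course pre suf heq hpre pvKnownDegrees pvDegreesNoSpace]
      rw [hsplit, heq]
      rw [show PySem.Chars.splitMax? (pre ++ ' ' :: suf) [' '] 1
            = some [pre, suf] from by
        rw [PySem.Chars.splitMax?, if_neg (by decide), pvSplitSpace pre suf hpre]]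
      simp only [Option.map_some, List.map_cons, List.map_nil]
      have hmem : String.ofList pre ∈ pvDegreeSet ↔ String.ofList pre ∈ pvKnownDegrees :=
        PySem.Set.mem_ofList pvKnownDegrees (String.ofList pre)
      by_cases hm : String.ofList pre ∈ pvKnownDegrees
      · rw [if_pos hm, if_pos (hmem.mpr hm)]
        refine Prod.ext rfl ?_
        simp only [Option.some.injEq]
        apply String.toList_inj.mp
        rw [PySem.Str.toList_strip, String.toList_ofList, String.toList_ofList]
      · rw [if_neg hm, if_neg (fun h => hm (hmem.mp h))]
    · rw [pvLoopNoSpace course hsp pvKnownDegrees pvDegreesNoSpace]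
      rw [hsplit]
      rw [show PySem.Chars.splitMax? course.toList [' '] 1 = some [course.toList] from by
        rw [PySem.Chars.splitMax?, if_neg (by decide), pvSplitNoSpace course.toList hsp]]
      simp only [Option.map_some, List.map_cons, List.map_nil, String.ofList_toList]
      have hmem : course ∈ pvDegreeSet ↔ course ∈ pvKnownDegrees :=
        PySem.Set.mem_ofList pvKnownDegrees course
      by_cases hm : course ∈ pvKnownDegrees
      · rw [if_pos hm, if_pos (hmem.mpr hm)]
      · rw [if_neg hm, if_neg (fun h => hm (hmem.mp h))]
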